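-- pv_equiv track=rewrite | github.com/yiyousiow000814/XAUUSD-Calendar-Agent | scripts/calendar/workflow/event_preheat_monitor.py | _baseline_pairs
-- ===== SOURCE A (Python) =====
-- from typing import Optional, Sequence
--
-- def _baseline_pairs(
--     pre_windows: Sequence[int], baselines: Sequence[int]
-- ) -> set[tuple[int, int]]:
--     pairs: set[tuple[int, int]] = set()
--     for window in pre_windows:
--         for base in baselines:
--             if base != window:
--                 pairs.add((window, base))
--     sorted_pre = sorted(pre_windows)
--     for idx, window in enumerate(sorted_pre):
--         for base in sorted_pre[idx + 1 :]:
--             pairs.add((window, base))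
--     return pairs
-- ===== SOURCE B (Python) =====
-- from typing import Optional, Sequence
--
-- def _baseline_pairs(
--     pre_windows: Sequence[int], baselines: Sequence[int]
-- ) -> set[tuple[int, int]]:
--     # Multiset decomposition: one pass records value multiplicities while emitting the
--     # window/baseline cross pairs; the suffix scan over the sorted full list is replaced
--     # by pairs over the (much smaller) sorted *distinct* values, with a self-pair (x, x)
--     # exactly for values occurring more than once.
--     pairs: set[tuple[int, int]] = set()
--     counts: dict[int, int] = {}
--     for window in pre_windows:
--         counts[window] = counts.get(window, 0) + 1
--         for base in baselines:
--             if base != window: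
--                 pairs.add((window, base))
--     vals = sorted(counts)
--     for a in vals:
--         if counts[a] > 1:
--             pairs.add((a, a))
--         for b in vals:
--             if a < b:
--                 pairs.add((a, b))
--     return pairs
-- ===== Notes on version B (the rewrite author's own statement) =====
-- stated objective: alternative
-- what changed: A's second pass sorts the full window list and scans every suffix (quadratic in the number of windows including duplicates); B never builds sorted suffixes: one combined pass collects a multiplicity dict alongside the cross pairs, then ordered pairs are generated from the sorted distinct values only, with a self-pair (x,x) exactly for values of multiplicity > 1.
import Mathlib
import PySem

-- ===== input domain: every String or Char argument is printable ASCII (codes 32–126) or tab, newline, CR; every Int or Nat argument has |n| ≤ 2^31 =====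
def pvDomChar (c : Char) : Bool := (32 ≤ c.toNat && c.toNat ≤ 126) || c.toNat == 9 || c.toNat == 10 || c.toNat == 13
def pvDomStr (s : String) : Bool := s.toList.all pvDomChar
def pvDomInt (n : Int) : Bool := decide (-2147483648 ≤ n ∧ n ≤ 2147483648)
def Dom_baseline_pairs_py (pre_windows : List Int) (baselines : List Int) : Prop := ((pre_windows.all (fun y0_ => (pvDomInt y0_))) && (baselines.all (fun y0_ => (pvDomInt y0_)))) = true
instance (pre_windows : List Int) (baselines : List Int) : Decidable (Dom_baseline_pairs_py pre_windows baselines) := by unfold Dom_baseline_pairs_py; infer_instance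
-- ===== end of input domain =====

-- B replaces A's sort-and-suffix second pass by a multiset decomposition: one combined pass
-- builds the cross pairs and a multiplicity dict, then ordered pairs come from the sorted
-- DISTINCT values (self-pairs exactly for values with multiplicity > 1) — alternative algorithm.


-- ===== PORT A =====
def baseline_pairs_py (pre_windows : List Int) (baselines : List Int) : List (Int × Int) :=
  let pairs : PySem.Set (Int × Int) :=
    pre_windows.foldl (fun pairs window =>
      baselines.foldl (fun pairs base =>
        if base ≠ window then PySem.Set.add pairs (window, base) else pairs) pairs)
      PySem.Set.empty
  let sorted_pre := PySem.List.sorted pre_windows (fun x => x) false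
  (PySem.List.enumerate sorted_pre).foldl (fun pairs iw =>
      (PySem.List.slice sorted_pre (some (iw.1 + 1)) none).foldl
        (fun pairs base => PySem.Set.add pairs (iw.2, base)) pairs)
    pairs

-- ===== PORT B =====
def baseline_pairs_py_alt (pre_windows : List Int) (baselines : List Int) : List (Int × Int) :=
  -- one pass: counts[window] = counts.get(window, 0) + 1, plus the cross pairs
  let st :=
    pre_windows.foldl (fun (st : PySem.Dict Int Int × PySem.Set (Int × Int)) window =>
      (st.1.insert window (st.1.getD window 0 + 1),
       baselines.foldl (fun pairs base =>
         if base ≠ window then PySem.Set.add pairs (window, base) else pairs) st.2))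
      (PySem.Dict.empty, PySem.Set.empty)
  let counts := st.1
  -- vals = sorted(counts): the sorted distinct window values
  let vals := PySem.List.sorted counts.keys (fun x => x) false
  vals.foldl (fun pairs a =>
      vals.foldl (fun pairs b => if a < b then PySem.Set.add pairs (a, b) else pairs)
        (if 1 < counts.getD a 0 then PySem.Set.add pairs (a, a) else pairs))
    st.2

-- ===== PRECONDITION & SPEC =====
def Spec_baseline_pairs_py (pre_windows : List Int) (baselines : List Int) (out : List (Int × Int)) : Prop := out = baseline_pairs_py_alt pre_windows baselines
instance (pre_windows : List Int) (baselines : List Int) (out : List (Int × Int)) : Decidable (Spec_baseline_pairs_py pre_windows baselines out) := by unfold Spec_baseline_pairs_py; infer_instance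

-- ===== CLAIM (what is proved, stated in full; the proofs are below) =====
def Claim_equal_baseline_pairs_py : Prop := ∀ (pre_windows : List Int) (baselines : List Int), Dom_baseline_pairs_py pre_windows baselines → Spec_baseline_pairs_py pre_windows baselines (baseline_pairs_py pre_windows baselines)

-- ===== LEMMAS AND PROOFS =====

-- canonical list of A's second pass: all suffix pairs of the sorted list, in order
def pvComb2 : List Int → List (Int × Int)
  | [] => []
  | x :: xs => xs.map (fun y => (x, y)) ++ pvComb2 xs

-- one block of B's second pass: the pairs attempted for a fixed left value a
def pvBlock (cnt : Int → Int) (vals : List Int) (a : Int) : List (Int × Int) :=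
  (if 1 < cnt a then [(a, a)] else []) ++ (vals.filter (fun b => a < b)).map (fun b => (a, b))

def pvBlocks (cnt : Int → Int) (vals : List Int) : List (Int × Int) :=
  vals.flatMap (pvBlock cnt vals)

lemma pvUpdate_of_forall_mem (s : PySem.Set (Int × Int)) (xs : List (Int × Int))
    (h : ∀ x ∈ xs, x ∈ s) : PySem.Set.update s xs = s := by
  rw [PySem.Set.update_eq_append_filter]
  have hnil : List.filter (fun y => !s.contains y) (PySem.Set.ofList xs) = [] := by
    rw [List.filter_eq_nil_iff]
    intro y hy
    have hys : y ∈ s := h y ((PySem.Set.mem_ofList xs y).mp hy)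
    simp [PySem.Set.contains, hys]
  rw [hnil, List.append_nil]

lemma pvUpdate_ofList (s : PySem.Set (Int × Int)) (l : List (Int × Int)) :
    PySem.Set.update s (PySem.Set.ofList l) = PySem.Set.update s l := by
  rw [PySem.Set.update_eq_append_filter, PySem.Set.update_eq_append_filter,
    PySem.Set.ofList_ofList]

lemma pvInner (a : Int) (l : List Int) :
    ∀ s : PySem.Set (Int × Int),
      l.foldl (fun s b => if a < b then PySem.Set.add s (a, b) else s) s
        = PySem.Set.update s ((l.filter (fun b => a < b)).map (fun b => (a, b))) := by
  induction l with
  | nil => intro s; simp [PySem.Set.update_nil]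
  | cons b t ih =>
      intro s
      by_cases hb : a < b
      · simpa [List.foldl_cons, List.filter_cons, hb, PySem.Set.update_cons]
          using ih (PySem.Set.add s (a, b))
      · simpa [List.foldl_cons, List.filter_cons, hb] using ih s

lemma pvPass2B (cnt : Int → Int) (inner : List Int) :
    ∀ (outer : List Int) (s : PySem.Set (Int × Int)),
      outer.foldl (fun pairs a =>
          inner.foldl (fun pairs b => if a < b then PySem.Set.add pairs (a, b) else pairs)
            (if 1 < cnt a then PySem.Set.add pairs (a, a) else pairs)) s
        = PySem.Set.update s (outer.flatMap (pvBlock cnt inner)) := by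
  intro outer
  induction outer with
  | nil => intro s; simp [PySem.Set.update_nil]
  | cons a rest ih =>
      intro s
      simp only [List.foldl_cons, List.flatMap_cons, PySem.Set.update_append]
      rw [pvInner, ih]
      congr 1
      unfold pvBlock
      rw [PySem.Set.update_append]
      congr 1
      by_cases hc : 1 < cnt a
      · simp [hc, PySem.Set.update_cons, PySem.Set.update_nil]
      · simp [hc, PySem.Set.update_nil]

lemma pvPass2B' (cnt : Int → Int) (vals : List Int) (s : PySem.Set (Int × Int)) :
    vals.foldl (fun pairs a =>
        vals.foldl (fun pairs b => if a < b then PySem.Set.add pairs (a, b) else pairs)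
          (if 1 < cnt a then PySem.Set.add pairs (a, a) else pairs)) s
      = PySem.Set.update s (pvBlocks cnt vals) :=
  pvPass2B cnt vals vals s

lemma pvMem_block_fst (cnt : Int → Int) (vals : List Int) (a : Int) (y : Int × Int)
    (h : y ∈ pvBlock cnt vals a) : y.1 = a := by
  unfold pvBlock at h
  rcases List.mem_append.mp h with h | h
  · split at h <;> simp_all
  · rcases List.mem_map.mp h with ⟨b, _, rfl⟩; rfl

lemma pvMem_blocks_fst (cnt : Int → Int) (vals : List Int) (y : Int × Int)
    (h : y ∈ pvBlocks cnt vals) : y.1 ∈ vals := by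
  rcases List.mem_flatMap.mp h with ⟨a, ha, hy⟩
  rw [pvMem_block_fst cnt vals a y hy]; exact ha

lemma pvOfList_map_pair (x : Int) (l : List Int) :
    PySem.Set.ofList (l.map (fun b => (x, b))) = (PySem.Set.ofList l).map (fun b => (x, b)) := by
  induction l using List.reverseRecOn with
  | nil => rfl
  | append_singleton t b ih =>
      rw [List.map_append, List.map_singleton, PySem.Set.ofList_append_singleton,
        PySem.Set.ofList_append_singleton, ih]
      have hmem : ((x, b) ∈ (PySem.Set.ofList t).map (fun c => (x, c)))
          ↔ b ∈ PySem.Set.ofList t := by simp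
      by_cases h : b ∈ PySem.Set.ofList t
      · rw [PySem.Set.add_of_mem (hmem.mpr h), PySem.Set.add_of_mem h]
      · rw [PySem.Set.add_of_not_mem (fun hc => h (hmem.mp hc)), PySem.Set.add_of_not_mem h,
          List.map_append, List.map_singleton]

lemma pvPairwise_lt_ofList (xs : List Int) (h : xs.Pairwise (· ≤ ·)) :
    (PySem.Set.ofList xs).Pairwise (· < ·) := by
  induction xs with
  | nil => simp [PySem.Set.ofList]
  | cons x t ih =>
      rw [PySem.Set.ofList_cons]
      rcases List.pairwise_cons.mp h with ⟨hx, ht⟩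
      refine List.Pairwise.cons ?_ ?_
      · intro y hy
        rcases (PySem.Set.mem_discard (PySem.Set.ofList t) x y).mp hy with ⟨hyt, hne⟩
        exact lt_of_le_of_ne (hx y ((PySem.Set.mem_ofList t y).mp hyt)) (Ne.symm hne)
      · exact List.Pairwise.filter _ (ih ht)

lemma pvDiscard_eq_filter (s : List (Int × Int)) (y : Int × Int) :
    PySem.Set.discard s y = List.filter (fun p => !(p == y)) s := rfl

lemma pvComb2_eq_blocks : ∀ (xs : List Int), xs.Pairwise (· ≤ ·) →
    PySem.Set.ofList (pvComb2 xs)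
      = pvBlocks (fun a => (List.count a xs : Int)) (PySem.List.dedup xs) := by
  intro xs
  induction xs with
  | nil =>
      intro _
      simp [pvComb2, pvBlocks, PySem.List.dedup_eq_ofList, PySem.Set.ofList]
  | cons x t ih =>
      intro h
      rcases List.pairwise_cons.mp h with ⟨hx, ht⟩
      by_cases hnx : x ∈ t
      · -- duplicate head: t starts with x again
        obtain ⟨t', rfl⟩ : ∃ t', t = x :: t' := by
          cases t with
          | nil => cases hnx
          | cons y t' =>
              have hyx : y = x := by
                rcases List.mem_cons.mp hnx with he | hmem
                · exact he.symm
                · exact le_antisymm ((List.pairwise_cons.mp ht).1 x hmem) (hx y (List.mem_cons_self))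
              exact ⟨t', by rw [hyx]⟩
        have hR : ∀ z ∈ (PySem.Set.ofList t').discard x, x < z := by
          intro z hz
          rcases (PySem.Set.mem_discard (PySem.Set.ofList t') x z).mp hz with ⟨hzt, hne⟩
          exact lt_of_le_of_ne (hx z (List.mem_cons_of_mem x ((PySem.Set.mem_ofList t' z).mp hzt)))
            (Ne.symm hne)
        have hD1 : PySem.List.dedup (x :: t') = x :: (PySem.Set.ofList t').discard x := by
          rw [PySem.List.dedup_eq_ofList, PySem.Set.ofList_cons]
        have hD2 : PySem.List.dedup (x :: x :: t') = x :: (PySem.Set.ofList t').discard x := by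
          rw [PySem.List.dedup_eq_ofList, PySem.Set.ofList_cons, PySem.Set.ofList_cons]
          show x :: List.filter (fun y => !(y == x))
              (x :: List.filter (fun y => !(y == x)) (PySem.Set.ofList t')) = _
          rw [List.filter_cons]
          simp only [List.filter_filter, Bool.and_self, beq_self_eq_true, Bool.not_true,
            Bool.false_eq_true, if_false]
          rfl
        have hfR : List.filter (fun b => decide (x < b)) (x :: (PySem.Set.ofList t').discard x)
            = (PySem.Set.ofList t').discard x := by
          rw [List.filter_cons]
          simp only [lt_irrefl, decide_false, Bool.false_eq_true, if_false]
          exact List.filter_eq_self.mpr (fun z hz => by simpa using hR z hz)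
        -- LHS: absorb the duplicated block, then use the IH
        have habs : PySem.Set.ofList (t'.map (fun b => (x, b)) ++ pvComb2 (x :: t'))
            = PySem.Set.ofList (pvComb2 (x :: t')) := by
          show PySem.Set.ofList (t'.map (fun b => (x, b)) ++
              (t'.map (fun b => (x, b)) ++ pvComb2 t')) = _
          rw [PySem.Set.ofList_append, PySem.Set.update_append,
            pvUpdate_of_forall_mem _ _ (fun p hp => (PySem.Set.mem_ofList _ p).mpr hp),
            ← PySem.Set.ofList_append]
          rfl
        have hLHS : PySem.Set.ofList (pvComb2 (x :: x :: t'))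
            = (x, x) :: ((PySem.Set.ofList (pvComb2 (x :: t'))).discard (x, x)) := by
          show PySem.Set.ofList ((x :: t').map (fun b => (x, b)) ++ pvComb2 (x :: t')) = _
          rw [List.map_cons, List.cons_append, PySem.Set.ofList_cons, habs]
        rw [hLHS, ih ht, hD1, hD2]
        -- both sides over vals = x :: R
        unfold pvBlocks
        rw [List.flatMap_cons, List.flatMap_cons, pvDiscard_eq_filter, List.filter_append]
        have hhead : List.filter (fun y => !(y == (x, x)))
            (pvBlock (fun a => (List.count a (x :: t') : Int))
              (x :: (PySem.Set.ofList t').discard x) x)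
            = ((PySem.Set.ofList t').discard x).map (fun b => (x, b)) := by
          simp only [pvBlock]
          rw [List.filter_append, hfR]
          have h1 : List.filter (fun y => !(y == (x, x)))
              (if 1 < ((List.count x (x :: t') : Nat) : Int) then [(x, x)] else []) = [] := by
            split <;> simp
          rw [h1, List.nil_append]
          exact List.filter_eq_self.mpr (fun p hp => by
            rcases List.mem_map.mp hp with ⟨b, hb, rfl⟩
            have : b ≠ x := (hR b hb).ne'
            simp [this])
        have htail : List.filter (fun y => !(y == (x, x)))
            (List.flatMap (pvBlock (fun a => (List.count a (x :: t') : Int))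
                (x :: (PySem.Set.ofList t').discard x)) ((PySem.Set.ofList t').discard x))
            = List.flatMap (pvBlock (fun a => (List.count a (x :: t') : Int))
                (x :: (PySem.Set.ofList t').discard x)) ((PySem.Set.ofList t').discard x) := by
          apply List.filter_eq_self.mpr
          intro p hp
          rcases List.mem_flatMap.mp hp with ⟨a, ha, hpa⟩
          have hp1 : p.1 = a := pvMem_block_fst _ _ a p hpa
          have : p ≠ (x, x) := by
            intro he; apply (hR a ha).ne'
            rw [← hp1, he]
          simp [this]
        rw [hhead, htail]
        -- RHS head block
        have hcnt2 : (1 : Int) < ((List.count x (x :: x :: t') : Nat) : Int) := by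
          rw [List.count_cons_self, List.count_cons_self]
          push_cast; omega
        have hrhead : pvBlock (fun a => (List.count a (x :: x :: t') : Int))
            (x :: (PySem.Set.ofList t').discard x) x
            = (x, x) :: ((PySem.Set.ofList t').discard x).map (fun b => (x, b)) := by
          simp only [pvBlock]
          rw [if_pos hcnt2, hfR]
          rfl
        have hrtail : List.flatMap (pvBlock (fun a => (List.count a (x :: x :: t') : Int))
              (x :: (PySem.Set.ofList t').discard x)) ((PySem.Set.ofList t').discard x)
            = List.flatMap (pvBlock (fun a => (List.count a (x :: t') : Int))
              (x :: (PySem.Set.ofList t').discard x)) ((PySem.Set.ofList t').discard x) := by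
          apply List.flatMap_congr
          intro a ha
          simp only [pvBlock]
          have hne : x ≠ a := ((hR a ha).ne)
          simp only [List.count_cons_of_ne hne]
        rw [hrhead, hrtail, List.cons_append]
      · -- distinct head: x does not occur in t
        have hlt : ∀ y ∈ t, x < y := fun y hy =>
          lt_of_le_of_ne (hx y hy) (fun e => hnx (e ▸ hy))
        have hdd : PySem.List.dedup (x :: t) = x :: PySem.List.dedup t := by
          rw [PySem.List.dedup_eq_ofList, PySem.List.dedup_eq_ofList, PySem.Set.ofList_cons]
          congr 1
          apply List.filter_eq_self.mpr
          intro y hy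
          have : y ≠ x := fun e => hnx (e ▸ (PySem.Set.mem_ofList t y).mp hy)
          simp [this]
        have hmap : PySem.Set.ofList (t.map (fun b => (x, b)))
            = (PySem.List.dedup t).map (fun b => (x, b)) := by
          rw [pvOfList_map_pair, PySem.List.dedup_eq_ofList]
        have hLHS : PySem.Set.ofList (pvComb2 (x :: t))
            = (PySem.List.dedup t).map (fun b => (x, b))
              ++ pvBlocks (fun a => (List.count a t : Int)) (PySem.List.dedup t) := by
          show PySem.Set.ofList (t.map (fun b => (x, b)) ++ pvComb2 t) = _
          rw [PySem.Set.ofList_append, PySem.Set.update_eq_append_filter, hmap, ih ht]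
          congr 1
          apply List.filter_eq_self.mpr
          intro p hp
          have hp1 : p.1 ∈ t := (PySem.List.mem_dedup t p.1).mp (pvMem_blocks_fst _ _ p hp)
          have hne : p.1 ≠ x := fun e => hnx (e ▸ hp1)
          simp [PySem.Set.contains]
          intro b _ he
          exact hne (by rw [← he])
        rw [hLHS, hdd]
        unfold pvBlocks
        rw [List.flatMap_cons]
        congr 1
        · -- head block = map over dedup t
          simp only [pvBlock]
          have hc1 : ¬ (1 : Int) < ((List.count x (x :: t) : Nat) : Int) := by
            rw [List.count_cons_self, List.count_eq_zero.mpr hnx]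
            norm_num
          rw [if_neg hc1, List.nil_append]
          rw [List.filter_cons]
          simp only [lt_irrefl, decide_false, Bool.false_eq_true, if_false]
          rw [List.filter_eq_self.mpr
            (fun b hb => by simpa using hlt b ((PySem.List.mem_dedup t b).mp hb))]
        · -- remaining blocks agree with the IH blocks
          apply List.flatMap_congr
          intro a ha
          have hat : a ∈ t := (PySem.List.mem_dedup t a).mp ha
          simp only [pvBlock]
          simp only [List.count_cons_of_ne (hlt a hat).ne]
          rw [List.filter_cons]
          have : ¬ a < x := not_lt_of_gt (hlt a hat)
          simp only [this, decide_false, Bool.false_eq_true, if_false]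

-- main pass-2 characterisation of A (enumerate/slice suffix scan = update with pvComb2)
lemma pvPass2A (xs : List Int) :
    ∀ (pre : List Int) (s : PySem.Set (Int × Int)),
      (PySem.List.enumerate xs (pre.length : Int)).foldl (fun s iw =>
          (PySem.List.slice (pre ++ xs) (some (iw.1 + 1)) none).foldl
            (fun s b => PySem.Set.add s (iw.2, b)) s) s
        = PySem.Set.update s (pvComb2 xs) := by
  induction xs with
  | nil => intro pre s; simp [PySem.List.enumerate_nil, pvComb2, PySem.Set.update_nil]
  | cons x t ih =>
      intro pre s
      rw [PySem.List.enumerate_cons]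
      simp only [List.foldl_cons]
      have hcast : ((pre.length : Int) + 1) = ((pre.length + 1 : Nat) : Int) := by push_cast; ring
      have hslice : PySem.List.slice (pre ++ x :: t) (some ((pre.length : Int) + 1)) none = t := by
        rw [hcast, PySem.List.slice_from_natCast]
        rw [show pre ++ x :: t = (pre ++ [x]) ++ t by simp]
        rw [List.drop_append_of_le_length (by simp)]
        simp
      rw [hslice]
      have hstep : t.foldl (fun s b => PySem.Set.add s (x, b)) s
          = PySem.Set.update s (t.map (fun b => (x, b))) := by
        rw [PySem.Set.update_map_eq_foldl_add]
      have hpre : ((pre.length : Int) + 1) = (((pre ++ [x]).length : Nat) : Int) := by simp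
      rw [hstep, hpre]
      have := ih (pre ++ [x]) (PySem.Set.update s (t.map (fun b => (x, b))))
      rw [show (pre ++ [x]) ++ t = pre ++ x :: t by simp] at this
      rw [this, ← PySem.Set.update_append]
      rfl

-- ===== VERDICT (by name: the statement is the Claim_ definition above) =====
theorem baseline_pairs_py_spec : Claim_equal_baseline_pairs_py := by
  intro pw bl _
  unfold Spec_baseline_pairs_py baseline_pairs_py baseline_pairs_py_alt
  have hsplit := PySem.List.foldl_prod_mk
    (fun (d : PySem.Dict Int Int) (window : Int) => d.insert window (d.getD window 0 + 1))
    (fun (s : PySem.Set (Int × Int)) (window : Int) =>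
      bl.foldl (fun pairs base =>
        if base ≠ window then PySem.Set.add pairs (window, base) else pairs) s)
    pw PySem.Dict.empty PySem.Set.empty
  simp only [hsplit, PySem.Dict.foldl_insert_getD_add_one_eq_counter]
  rw [pvPass2B']
  have hA := pvPass2A (PySem.List.sorted pw (fun x => x) false) []
    (pw.foldl (fun pairs window =>
      bl.foldl (fun pairs base =>
        if base ≠ window then PySem.Set.add pairs (window, base) else pairs) pairs)
      PySem.Set.empty)
  simp only [List.nil_append, List.length_nil, Nat.cast_zero] at hA
  rw [hA]
  have hcnt : (fun a => (PySem.Dict.counter pw).getD a 0)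
      = (fun a => (List.count a (PySem.List.sorted pw (fun x => x) false) : Int)) := by
    funext a
    have hperm := PySem.List.sorted_perm pw (fun x => x) false
    rw [PySem.Dict.getD_counter]
    norm_cast
    exact (hperm.count_eq a).symm
  have hvals : PySem.List.sorted (PySem.Dict.counter pw).keys (fun x => x) false
      = PySem.List.dedup (PySem.List.sorted pw (fun x => x) false) := by
    rw [PySem.Dict.keys_counter, PySem.List.dedup_eq_ofList]
    apply PySem.List.sorted_eq_of_perm_of_pairwise_lt
    · apply (List.perm_ext_iff_of_nodup (PySem.Set.nodup_ofList _) (PySem.Set.nodup_ofList _)).mpr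
      intro a
      rw [PySem.Set.mem_ofList, PySem.Set.mem_ofList]
      exact (PySem.List.sorted_perm pw (fun x => x) false).mem_iff
    · exact pvPairwise_lt_ofList _ (PySem.List.sorted_pairwise pw (fun x => x))
  rw [hcnt, hvals,
    ← pvComb2_eq_blocks (PySem.List.sorted pw (fun x => x) false)
      (PySem.List.sorted_pairwise pw (fun x => x)),
    pvUpdate_ofList]
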